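-- pv_equiv track=rewrite | github.com/ibtSdan/1Day1Problem | 프로그래머스/1/12917. 문자열 내림차순으로 배치하기/문자열 내림차순으로 배치하기.py | solution
-- ===== SOURCE A (Python) =====
-- def solution(s):
--     s = list(s)
--     upper = []
--     for i in s:
--         if i.isupper():
--             upper.append(i)
--     s.sort(reverse=True)
--     upper.sort(reverse=True)
--
--     return ''.join(i for i in s if not i.isupper()) + ''.join(i for i in upper)
-- ===== SOURCE B (Python) =====
-- def solution(s):
--     counts = {}
--     for ch in s:
--         counts[ch] = counts.get(ch, 0) + 1
--     parts = []
--     for c in range(127, -1, -1):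
--         if not (65 <= c <= 90):
--             parts.append(chr(c) * counts.get(chr(c), 0))
--     for c in range(90, 64, -1):
--         parts.append(chr(c) * counts.get(chr(c), 0))
--     return ''.join(parts)
-- ===== Notes on version B (the rewrite author's own statement) =====
-- stated objective: faster
-- what changed: A sorts the characters twice with comparison sorts and filters the sorted list; B makes one counting pass into a dict and emits the characters by walking the 128 ASCII codes downwards (non-uppercase codes first, then Z..A), an O(n + 128) counting sort instead of O(n log n).
import Mathlib
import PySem

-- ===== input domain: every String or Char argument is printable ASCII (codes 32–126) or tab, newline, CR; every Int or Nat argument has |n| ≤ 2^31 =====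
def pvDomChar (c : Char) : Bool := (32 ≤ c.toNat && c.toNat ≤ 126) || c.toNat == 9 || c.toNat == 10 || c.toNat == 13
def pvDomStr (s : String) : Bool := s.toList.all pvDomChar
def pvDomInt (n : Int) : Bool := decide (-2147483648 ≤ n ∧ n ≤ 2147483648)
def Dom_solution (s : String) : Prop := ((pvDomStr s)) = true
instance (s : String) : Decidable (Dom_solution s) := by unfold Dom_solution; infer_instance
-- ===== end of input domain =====

-- B replaces A's two comparison sorts by a single counting pass over the fixed ASCII alphabet
-- (O(n + 128) instead of O(n log n)); return values agree on the whole domain.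

-- ===== PORT A =====
-- literal port of A: collect the uppercase letters with a loop, sort both lists
-- descending, join the non-uppercase part of the sorted string, then the uppercase part.
-- (''.join(x) + ''.join(y) is ported as String.mk of the concatenated char lists — exact.)
def solution (s : String) : String :=
  let cs := s.toList
  let upper := cs.foldl (fun acc c => if PySem.Chars.isupper c then acc ++ [c] else acc) []
  let cs' := PySem.List.sorted cs (fun c => c) true
  let upper' := PySem.List.sorted upper (fun c => c) true
  String.mk (cs'.filter (fun c => !PySem.Chars.isupper c) ++ upper')

-- ===== PORT B =====
-- literal port of B (Source B): count characters into a dict, then walk the ASCII codes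
-- downwards, emitting chr(c) * count for the non-uppercase codes first, then 'Z'..'A'.
def solution_alt (s : String) : String :=
  let counts := s.toList.foldl (fun d c => d.insert c (d.getD c 0 + 1)) PySem.Dict.empty
  let parts1 := (PySem.List.pyRange 127 (-1) (-1)).foldl
    (fun acc c => if ¬ (65 ≤ c ∧ c ≤ 90) then
        acc ++ PySem.List.pyRepeat [Char.ofNat c.toNat] (counts.getD (Char.ofNat c.toNat) 0)
      else acc) []
  let parts2 := (PySem.List.pyRange 90 64 (-1)).foldl
    (fun acc c => acc ++ PySem.List.pyRepeat [Char.ofNat c.toNat] (counts.getD (Char.ofNat c.toNat) 0)) parts1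
  String.mk parts2

-- ===== PRECONDITION & SPEC =====
def Spec_solution (s : String) (out : String) : Prop := out = solution_alt s
instance (s : String) (out : String) : Decidable (Spec_solution s out) := by unfold Spec_solution; infer_instance

-- ===== CLAIM (what is proved, stated in full; the proofs are below) =====
def Claim_equal_solution : Prop := ∀ (s : String), Dom_solution s → Spec_solution s (solution s)

-- ===== LEMMAS AND PROOFS =====

-- the code→char map used by B
def pvChr (k : Int) : Char := Char.ofNat k.toNat

lemma pvChr_toNat {k : Int} (h0 : 0 ≤ k) (h1 : k < 128) : ((pvChr k).toNat : Int) = k := by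
  unfold pvChr
  have hk : k.toNat < 128 := by omega
  have : (Char.ofNat k.toNat).toNat = k.toNat := by
    rw [Char.toNat_ofNat, if_pos]
    exact Or.inl (by omega)
  omega

lemma pvKey_injective : Function.Injective (fun c : Char => -(c.toNat : Int)) := by
  intro a b h
  simp only [neg_inj, Int.natCast_inj] at h
  exact Char.eq_of_val_eq (by
    have : a.val.toNat = b.val.toNat := h
    exact UInt32.toNat_inj.mp this)

-- a filter over a disjunction of disjoint tests splits (up to permutation) into two filters
lemma pvFilter_or_perm {α : Type} (p q : α → Bool) (l : List α)
    (hdisj : ∀ x ∈ l, ¬(p x = true ∧ q x = true)) :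
    (l.filter (fun x => p x || q x)).Perm (l.filter p ++ l.filter q) := by
  induction l with
  | nil => simp
  | cons a t ih =>
    have hd := hdisj a (by simp)
    have iht := ih (fun x hx => hdisj x (by simp [hx]))
    by_cases hp : p a = true
    · have hq : q a = false := by
        cases hqa : q a with
        | false => rfl
        | true => exact absurd ⟨hp, hqa⟩ hd
      simpa [List.filter_cons, hp, hq] using iht.cons a
    · have hp' : p a = false := by simpa using hp
      by_cases hq : q a = true
      · simp only [List.filter_cons, hp', hq, Bool.false_or]
        exact (iht.cons a).trans List.perm_middle.symm
      · have hq' : q a = false := by simpa using hq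
        simpa [List.filter_cons, hp', hq'] using iht

-- the counting-sort core: concatenating count-many copies of each code (codes distinct,
-- in ASCII range) is a permutation of the filter "my code is listed"
lemma pvCount_perm (cs : List Char) (codes : List Int) (hn : codes.Nodup)
    (hb : ∀ k ∈ codes, 0 ≤ k ∧ k < 128) :
    (codes.flatMap fun k => List.replicate (cs.count (pvChr k)) (pvChr k)).Perm
      (cs.filter (fun x => decide ((x.toNat : Int) ∈ codes))) := by
  induction codes with
  | nil => simp
  | cons k ks ih =>
    have hk := hb k (by simp)
    have hks : ∀ k' ∈ ks, 0 ≤ k' ∧ k' < 128 := fun k' hk' => hb k' (by simp [hk'])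
    have hknotin : k ∉ ks := (List.nodup_cons.mp hn).1
    have ihp := ih (List.nodup_cons.mp hn).2 hks
    have hsplit : (cs.filter (fun x => decide ((x.toNat : Int) ∈ k :: ks))).Perm
        (cs.filter (fun x => decide ((x.toNat : Int) = k)) ++
         cs.filter (fun x => decide ((x.toNat : Int) ∈ ks))) := by
      have := pvFilter_or_perm (fun x : Char => decide ((x.toNat : Int) = k))
        (fun x : Char => decide ((x.toNat : Int) ∈ ks)) cs
        (fun x _ h => by
          obtain ⟨h1, h2⟩ := h
          simp only [decide_eq_true_eq] at h1 h2
          exact hknotin (h1 ▸ h2))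
      refine List.Perm.trans ?_ this
      apply List.Perm.of_eq
      apply List.filter_congr
      intro x _
      simp [List.mem_cons]
    have hrep : cs.filter (fun x => decide ((x.toNat : Int) = k)) =
        List.replicate (cs.count (pvChr k)) (pvChr k) := by
      have hcong : cs.filter (fun x => decide ((x.toNat : Int) = k)) =
          cs.filter (fun x => x == pvChr k) := by
        apply List.filter_congr
        intro x _
        have hchr := pvChr_toNat hk.1 hk.2
        rw [Bool.eq_iff_iff]
        simp only [decide_eq_true_eq, beq_iff_eq]
        constructor <;> intro h
        · exact pvKey_injective (show -(x.toNat : Int) = -((pvChr k).toNat : Int) by omega)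
        · subst h
          simpa using hchr
      rw [hcong, List.filter_beq]
    simp only [List.flatMap_cons]
    rw [← hrep]
    exact (ihp.append_left _).trans hsplit.symm

-- descending codes give a descending flatMap of replicate blocks
lemma pvPairwise_flatMap (cs : List Char) (codes : List Int)
    (hdesc : codes.Pairwise (fun a b => b < a))
    (hb : ∀ k ∈ codes, 0 ≤ k ∧ k < 128) :
    (codes.flatMap fun k => List.replicate (cs.count (pvChr k)) (pvChr k)).Pairwise
      (fun a b : Char => -(a.toNat : Int) ≤ -(b.toNat : Int)) := by
  induction codes with
  | nil => simp
  | cons k ks ih =>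
    have hk := hb k (by simp)
    have hks : ∀ k' ∈ ks, 0 ≤ k' ∧ k' < 128 := fun k' hk' => hb k' (by simp [hk'])
    simp only [List.flatMap_cons]
    rw [List.pairwise_append]
    refine ⟨?_, ih (List.pairwise_cons.mp hdesc).2 hks, ?_⟩
    · exact List.pairwise_replicate.mpr (Or.inr le_rfl)
    · intro a ha b hb'
      have ha' : a = pvChr k := List.eq_of_mem_replicate ha
      obtain ⟨k', hk'mem, hb''⟩ := List.mem_flatMap.mp hb'
      have hb3 : b = pvChr k' := List.eq_of_mem_replicate hb''
      have hlt : k' < k := (List.pairwise_cons.mp hdesc).1 k' hk'mem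
      have h1 := pvChr_toNat hk.1 hk.2
      have h2 := pvChr_toNat (hks k' hk'mem).1 (hks k' hk'mem).2
      subst ha' hb3
      omega

-- the central lemma: the counting output over distinct descending in-range codes equals
-- ANY descending list that is a permutation of "the characters of cs whose code is listed"
lemma pvPart_eq (cs : List Char) (codes : List Int) (p : Char → Bool) (l : List Char)
    (hn : codes.Nodup) (hdesc : codes.Pairwise (fun a b => b < a))
    (hb : ∀ k ∈ codes, 0 ≤ k ∧ k < 128)
    (hiff : ∀ x ∈ cs, decide ((x.toNat : Int) ∈ codes) = p x)
    (hperm : l.Perm (cs.filter p))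
    (hl : l.Pairwise (fun a b : Char => b.toNat ≤ a.toNat)) :
    (codes.flatMap fun k => List.replicate (cs.count (pvChr k)) (pvChr k)) = l := by
  apply PySem.List.eq_of_perm_of_pairwise_le_of_injective
    (fun c : Char => -(c.toNat : Int)) pvKey_injective
  · refine (pvCount_perm cs codes hn hb).trans ?_
    rw [List.filter_congr hiff]
    exact hperm.symm
  · exact pvPairwise_flatMap cs codes hdesc hb
  · exact hl.imp (fun h => by omega)

lemma pvRange_neg_one_desc (a b : Int) :
    (PySem.List.pyRange a b (-1)).Pairwise (fun x y => y < x) := by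
  rw [PySem.List.pyRange_neg_one_eq_reverse, List.pairwise_reverse]
  exact PySem.List.pairwise_lt_pyRange_one (b + 1) (a + 1)

lemma pvIsupper_iff (c : Char) : PySem.Chars.isupper c = true ↔ (65 ≤ c.toNat ∧ c.toNat ≤ 90) := by
  simp only [PySem.Chars.isupper, Bool.and_eq_true, decide_eq_true_eq]
  constructor <;> intro h
  · obtain ⟨h1, h2⟩ := h
    exact ⟨h1, h2⟩
  · exact ⟨h.1, h.2⟩

lemma pvChar_le_toNat {a b : Char} (h : a ≤ b) : a.toNat ≤ b.toNat := by
  rw [Char.le_def] at h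
  exact UInt32.le_iff_toNat_le.mp h

-- the two code lists B walks
lemma pvCodes1_facts : ((PySem.List.pyRange 127 (-1) (-1)).filter
      (fun c => decide (¬(65 ≤ c ∧ c ≤ 90)))).Pairwise (fun a b => b < a) ∧
    ∀ k ∈ (PySem.List.pyRange 127 (-1) (-1)).filter (fun c => decide (¬(65 ≤ c ∧ c ≤ 90))),
      0 ≤ k ∧ k < 128 := by
  constructor
  · exact List.Pairwise.sublist List.filter_sublist (pvRange_neg_one_desc 127 (-1))
  · intro k hk
    have := (List.mem_filter.mp hk).1
    rw [PySem.List.mem_pyRange_neg_one] at this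
    omega

lemma pvMain (cs : List Char) (hdc : ∀ x ∈ cs, pvDomChar x = true) :
    (((PySem.List.pyRange 127 (-1) (-1)).filter (fun c => decide (¬(65 ≤ c ∧ c ≤ 90)))).flatMap
        (fun k => List.replicate (cs.count (pvChr k)) (pvChr k)) =
      (PySem.List.sorted cs (fun c => c) true).filter (fun c => !PySem.Chars.isupper c)) ∧
    ((PySem.List.pyRange 90 64 (-1)).flatMap
        (fun k => List.replicate (cs.count (pvChr k)) (pvChr k)) =
      PySem.List.sorted (cs.filter (fun c => PySem.Chars.isupper c)) (fun c => c) true) := by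
  obtain ⟨hdesc1, hb1⟩ := pvCodes1_facts
  constructor
  · refine pvPart_eq cs _ (fun c => !PySem.Chars.isupper c) _
      (hdesc1.imp (fun h => (ne_of_lt h).symm)) hdesc1 hb1 ?_ ?_ ?_
    · intro x hx
      have hxd := hdc x hx
      have hxb : x.toNat ≤ 126 := by
        simp only [pvDomChar, Bool.or_eq_true, Bool.and_eq_true, decide_eq_true_eq,
          beq_iff_eq] at hxd
        omega
      rw [Bool.eq_iff_iff]
      simp only [List.mem_filter, PySem.List.mem_pyRange_neg_one, decide_eq_true_eq,
        Bool.not_eq_true', ← Bool.not_eq_true, pvIsupper_iff]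
      omega
    · exact (PySem.List.sorted_perm cs (fun c => c) true).filter _
    · exact ((PySem.List.sorted_pairwise_rev cs (fun c => c)).imp
        (fun h => pvChar_le_toNat h)).filter _
  · refine pvPart_eq cs _ (fun c => PySem.Chars.isupper c) _
      ((pvRange_neg_one_desc 90 64).imp (fun h => (ne_of_lt h).symm))
      (pvRange_neg_one_desc 90 64)
      (fun k hk => by rw [PySem.List.mem_pyRange_neg_one] at hk; omega) ?_ ?_ ?_
    · intro x hx
      rw [Bool.eq_iff_iff]
      simp only [PySem.List.mem_pyRange_neg_one, decide_eq_true_eq, pvIsupper_iff]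
      omega
    · exact PySem.List.sorted_perm _ (fun c => c) true
    · exact (PySem.List.sorted_pairwise_rev _ (fun c => c)).imp (fun h => pvChar_le_toNat h)

-- ===== VERDICT (by name: the statement is the Claim_ definition above) =====
theorem solution_spec : Claim_equal_solution := by
  intro s hdom
  have hdc : ∀ x ∈ s.toList, pvDomChar x = true := by
    unfold Dom_solution pvDomStr at hdom
    exact List.all_eq_true.mp hdom
  unfold Spec_solution
  simp only [solution, solution_alt]
  rw [PySem.Dict.foldl_insert_getD_add_one_eq_counter]
  rw [PySem.List.foldl_ite_eq_foldl_filter (p := fun c : Int => ¬(65 ≤ c ∧ c ≤ 90))]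
  rw [PySem.List.foldl_append_eq_flatMap, PySem.List.foldl_append_eq_flatMap]
  rw [PySem.List.foldl_append_if_eq_filter]
  simp only [List.nil_append, PySem.List.pyRepeat_singleton, PySem.Dict.getD_counter,
    Int.toNat_natCast]
  obtain ⟨h1, h2⟩ := pvMain s.toList hdc
  simp only [pvChr] at h1 h2
  rw [h1, h2]
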